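-- pv_equiv track=rewrite | github.com/Mimilv1/Best-Strategy-2-player | Results/Calcul.py | association
-- ===== SOURCE A (Python) =====
-- def association(n):
--     """
--     Le but de cette fonction est de relier les déplacement des joueurs a la bonne ligne dans la matrice de gain
--
--     :param n: valeur du deplacement
--     :return: dictionaire entre deplacement effectuer et indice de la ligne/colonne dans la matrice de gain
--     """
--     table = {}
--     compteur = 0
--     for x in range(-n, n+1):
--         for y in range(-abs(n-abs(x)), abs(n-abs(x))+1):
--             table[(x, y)] = compteur
--             compteur += 1
--     return table
-- ===== SOURCE B (Python) =====
-- def association(n):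
--     """Closed-form index: offset of column x via prefix sums of band widths, no running counter."""
--     total = 2 * n * n + 2 * n + 1
--
--     def start(x):
--         # points in all columns strictly left of x
--         if x <= 0:
--             return (n + x) * (n + x)
--         return total - (n - x + 1) * (n - x + 1)
--
--     return {
--         (x, y): start(x) + y + (n - abs(x))
--         for x in range(-n, n + 1)
--         for y in range(abs(x) - n, n - abs(x) + 1)
--     }
-- ===== Notes on version B (the rewrite author's own statement) =====
-- stated objective: alternative
-- what changed: B computes each point's dict value by a closed-form per-column prefix offset (quadratic formula for the number of points left of column x) instead of A's running counter threaded through nested loops, and builds the dict in a single comprehension.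
import Mathlib
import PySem

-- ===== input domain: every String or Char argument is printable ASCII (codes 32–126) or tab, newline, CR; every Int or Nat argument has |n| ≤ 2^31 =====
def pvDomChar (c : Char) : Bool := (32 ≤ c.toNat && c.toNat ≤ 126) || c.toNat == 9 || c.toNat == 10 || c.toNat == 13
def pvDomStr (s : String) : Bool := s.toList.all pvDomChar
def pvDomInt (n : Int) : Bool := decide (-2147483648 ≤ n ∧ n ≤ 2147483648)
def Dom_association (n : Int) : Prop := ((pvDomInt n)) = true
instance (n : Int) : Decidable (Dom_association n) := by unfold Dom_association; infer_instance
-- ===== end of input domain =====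

-- B replaces A's running counter by a closed-form per-column prefix offset and builds the dict
-- in one comprehension over columns (objective: alternative decomposition, same cost).

-- ===== PORT A =====
-- A: nested loops over columns x and band rows y, inserting (x,y) ↦ running counter.
def association (n : Int) : List (Int × Int × Int) :=
  ((PySem.List.pyRange (-n) (n+1) 1).foldl
      (fun (s : PySem.Dict (Int × Int) Int × Int) x =>
        (PySem.List.pyRange (-(abs (n - abs x))) (abs (n - abs x) + 1) 1).foldl
          (fun t y => (t.1.insert (x, y) t.2, t.2 + 1)) s)
      (PySem.Dict.empty, 0)).1.items.map (fun p => (p.1.1, p.1.2, p.2))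

-- ===== PORT B =====
-- start(x) = number of lattice points in columns strictly left of x (closed form)
def bOff (n x : Int) : Int :=
  if x ≤ 0 then (n + x) * (n + x)
  else 2*n*n + 2*n + 1 - (n - x + 1) * (n - x + 1)

-- the dict comprehension's (key, value) stream
def assocPairsB (n : Int) : List ((Int × Int) × Int) :=
  (PySem.List.pyRange (-n) (n+1) 1).flatMap (fun x =>
    (PySem.List.pyRange (abs x - n) (n - abs x + 1) 1).map
      (fun y => ((x, y), bOff n x + y + (n - abs x))))

def association_alt (n : Int) : List (Int × Int × Int) :=
  (PySem.Dict.ofList (assocPairsB n)).items.map (fun p => (p.1.1, p.1.2, p.2))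

-- ===== PRECONDITION & SPEC =====
def Spec_association (n : Int) (out : List (Int × Int × Int)) : Prop := out = association_alt n
instance (n : Int) (out : List (Int × Int × Int)) : Decidable (Spec_association n out) := by unfold Spec_association; infer_instance

-- ===== CLAIM (what is proved, stated in full; the proofs are below) =====
def Claim_equal_association : Prop := ∀ (n : Int), Dom_association n → Spec_association n (association n)

-- ===== LEMMAS AND PROOFS =====

-- spec of one column of A's loop, counter starting at c
def colSpec (n x c : Int) : List ((Int × Int) × Int) :=
  (PySem.List.pyRange (-(n - abs x)) (n - abs x + 1) 1).map
    (fun y => ((x, y), c + y + (n - abs x)))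

-- items produced by A's outer loop from column x on, counter starting at c (fuel = remaining columns)
def suffixF (n : Int) : Nat → Int → Int → List ((Int × Int) × Int)
  | 0, _, _ => []
  | f+1, x, c => colSpec n x c ++ suffixF n f (x+1) (c + (2*(n - abs x) + 1))

-- counter increase over the remaining columns
def cntF (n : Int) : Nat → Int → Int
  | 0, _ => 0
  | f+1, x => (2*(n - abs x) + 1) + cntF n f (x+1)

lemma inner_eq (x : Int) (k : Nat) : ∀ (a : Int) (d : PySem.Dict (Int × Int) Int) (c : Int),
    (PySem.List.pyRange a (a + (k : Int)) 1).foldl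
        (fun t y => (t.1.insert (x, y) t.2, t.2 + 1)) (d, c)
    = ((PySem.List.pyRange a (a + (k : Int)) 1).foldl
        (fun d' y => d'.insert (x, y) (c + (y - a))) d, c + (k : Int)) := by
  induction k with
  | zero =>
    intro a d c
    rw [PySem.List.pyRange_one_eq_nil (by omega)]
    simp
  | succ f ih =>
    intro a d c
    rw [PySem.List.pyRange_one_cons (by omega)]
    simp only [List.foldl_cons]
    have hrw : a + ((f + 1 : Nat) : Int) = (a + 1) + ((f : Nat) : Int) := by push_cast; ring
    rw [hrw, ih (a + 1) (d.insert (x, a) c) (c + 1)]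
    simp only [Prod.mk.injEq]
    constructor
    · have hfix : ∀ (acc : PySem.Dict (Int × Int) Int), ∀ y ∈ PySem.List.pyRange (a+1) (a + 1 + (f : Int)) 1,
          acc.insert (x, y) ((c + 1) + (y - (a + 1))) = acc.insert (x, y) (c + (y - a)) := by
        intro acc y _
        have h : (c + 1) + (y - (a + 1)) = c + (y - a) := by ring
        rw [h]
      rw [PySem.List.foldl_congr_mem _ _ _ _ hfix]
      have h : c + (a - a) = c := by ring
      rw [h]
    · push_cast; ring

lemma fresh_of_lt (x : Int) (d : PySem.Dict (Int × Int) Int)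
    (hd : ∀ p ∈ d.items, p.1.1 < x) (y : Int) : d.contains (x, y) = false := by
  cases hc : d.contains (x, y) with
  | false => rfl
  | true =>
    exfalso
    have hk := (PySem.Dict.contains_iff_mem_keys d (x, y)).mp hc
    simp only [PySem.Dict.keys, List.mem_map] at hk
    obtain ⟨p, hp, hfst⟩ := hk
    have := hd p hp
    rw [hfst] at this
    exact lt_irrefl x this

lemma outer_eq (n : Int) (_hn : 0 ≤ n) :
    ∀ (f : Nat) (x c : Int) (d : PySem.Dict (Int × Int) Int),
    x + (f : Int) = n + 1 → -n ≤ x →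
    (∀ p ∈ d.items, p.1.1 < x) →
    (PySem.List.pyRange x (n+1) 1).foldl
      (fun (s : PySem.Dict (Int × Int) Int × Int) x' =>
        (PySem.List.pyRange (-(abs (n - abs x'))) (abs (n - abs x') + 1) 1).foldl
          (fun t y => (t.1.insert (x', y) t.2, t.2 + 1)) s) (d, c)
    = (PySem.Dict.mk (d.items ++ suffixF n f x c), c + cntF n f x) := by
  intro f
  induction f with
  | zero =>
    intro x c d hx _ _
    rw [PySem.List.pyRange_one_eq_nil (by omega)]
    simp [suffixF, cntF]
  | succ f ih =>
    intro x c d hx hxl hd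
    have hxn : x ≤ n := by omega
    have habsx : abs x ≤ n := abs_le.mpr ⟨by omega, hxn⟩
    have hh : abs (n - abs x) = n - abs x := abs_of_nonneg (by omega)
    rw [PySem.List.pyRange_one_cons (by omega)]
    simp only [List.foldl_cons]
    have hk : (n - abs x) + 1 = -(n - abs x) + (((2*(n - abs x) + 1).toNat : Nat) : Int) := by omega
    rw [hh, hk, inner_eq x (2*(n - abs x) + 1).toNat (-(n - abs x)) d c]
    set r := PySem.List.pyRange (-(n - abs x)) (-(n - abs x) + (((2*(n - abs x) + 1).toNat : Nat) : Int)) 1 with hr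
    have hfresh : ∀ y ∈ r, d.contains ((fun y => (x, y)) y) = false := fun y _ => fresh_of_lt x d hd y
    have hnodup : (r.map (fun y => ((x : Int), y))).Nodup :=
      (PySem.List.nodup_pyRange_one _ _).map (fun a b h => by simpa using congrArg Prod.snd h)
    have hitems :
        (r.foldl (fun d' y => d'.insert (x, y) (c + (y - -(n - abs x)))) d).items
        = d.items ++ r.map (fun y => ((x, y), c + (y - -(n - abs x)))) :=
      PySem.Dict.items_foldl_insert_fresh r (fun y => (x, y)) (fun y => c + (y - -(n - abs x))) d hfresh hnodup
    have hcol : r.map (fun y => ((x, y), c + (y - -(n - abs x)))) = colSpec n x c := by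
      unfold colSpec
      have hre : r = PySem.List.pyRange (-(n - abs x)) (n - abs x + 1) 1 := by rw [hr]; congr 1; omega
      rw [hre]
      apply List.map_congr_left
      intro y _
      have h : c + (y - -(n - abs x)) = c + y + (n - abs x) := by ring
      rw [h]
    have hd1 : ∀ p ∈ (r.foldl (fun d' y => d'.insert (x, y) (c + (y - -(n - abs x)))) d).items, p.1.1 < x + 1 := by
      intro p hp
      rw [hitems] at hp
      rcases List.mem_append.mp hp with h | h
      · exact lt_trans (hd p h) (by omega)
      · obtain ⟨y, _, hy⟩ := List.mem_map.mp h
        rw [← hy]; show x < x + 1; omega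
    rw [ih (x + 1) (c + (((2*(n - abs x) + 1).toNat : Nat) : Int)) _ (by push_cast at hx ⊢; omega) (by omega) hd1]
    have hcast : (((2*(n - abs x) + 1).toNat : Nat) : Int) = 2*(n - abs x) + 1 := by omega
    simp only [Prod.mk.injEq]
    constructor
    · congr 1
      rw [hitems, hcol, List.append_assoc]
      simp only [suffixF]
      congr 2
      rw [hcast]
    · simp only [cntF]
      rw [hcast]
      ring

lemma bOff_step (n x : Int) (hl : -n ≤ x) (hr : x ≤ n) :
    bOff n (x+1) = bOff n x + (2*(n - abs x) + 1) := by
  unfold bOff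
  by_cases hx : x ≤ 0
  · rw [abs_of_nonpos hx]
    by_cases hx1 : x + 1 ≤ 0
    · rw [if_pos hx1, if_pos hx]; ring
    · have hx0 : x = 0 := by omega
      subst hx0
      norm_num
      ring
  · rw [abs_of_pos (by omega), if_neg (by omega), if_neg hx]
    ring

lemma bridge (n : Int) (_hn : 0 ≤ n) :
    ∀ (f : Nat) (x : Int), x + (f : Int) = n + 1 → -n ≤ x →
    suffixF n f x (bOff n x)
    = (PySem.List.pyRange x (n+1) 1).flatMap (fun x' =>
        (PySem.List.pyRange (abs x' - n) (n - abs x' + 1) 1).map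
          (fun y => ((x', y), bOff n x' + y + (n - abs x')))) := by
  intro f
  induction f with
  | zero =>
    intro x hx _
    rw [PySem.List.pyRange_one_eq_nil (by omega)]
    simp [suffixF]
  | succ f ih =>
    intro x hx hxl
    rw [PySem.List.pyRange_one_cons (by omega), List.flatMap_cons]
    simp only [suffixF]
    rw [← bOff_step n x hxl (by omega), ih (x+1) (by push_cast at hx ⊢; omega) (by omega)]
    congr 1
    unfold colSpec
    have h : abs x - n = -(n - abs x) := by ring
    rw [h]

lemma keys_nodup (n : Int) : ((assocPairsB n).map (fun p => p.1)).Nodup := by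
  unfold assocPairsB
  rw [List.map_flatMap, List.nodup_flatMap]
  constructor
  · intro x _
    simp only [List.map_map]
    have h : ((fun (p : (Int × Int) × Int) => p.1) ∘ fun y => ((x, y), bOff n x + y + (n - abs x)))
        = fun y => ((x : Int), y) := by funext y; rfl
    rw [h]
    exact (PySem.List.nodup_pyRange_one _ _).map (fun a b h => by simpa using congrArg Prod.snd h)
  · have hne : (PySem.List.pyRange (-n) (n+1) 1).Pairwise (· ≠ ·) :=
      (PySem.List.pairwise_lt_pyRange_one _ _).imp (fun h => ne_of_lt h)
    apply hne.imp
    intro a b hab p hp hq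
    simp only [List.map_map, List.mem_map, Function.comp] at hp hq
    obtain ⟨y1, _, h1⟩ := hp
    obtain ⟨y2, _, h2⟩ := hq
    exact hab (congrArg Prod.fst (h1.trans h2.symm))

lemma ofList_items (n : Int) : (PySem.Dict.ofList (assocPairsB n)).items = assocPairsB n := by
  show (PySem.Dict.update PySem.Dict.empty (assocPairsB n)).items = _
  unfold PySem.Dict.update
  have h := PySem.Dict.items_foldl_insert_fresh (assocPairsB n) (fun p => p.1) (fun p => p.2)
      PySem.Dict.empty (fun a _ => by simp [pysem]) (keys_nodup n)
  simpa using h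

lemma main_eq (n : Int) : association n = association_alt n := by
  unfold association association_alt
  rw [ofList_items]
  by_cases hn : 0 ≤ n
  · rw [outer_eq n hn (2*n+1).toNat (-n) 0 PySem.Dict.empty (by omega) (by omega)
        (by intro p hp; simp [PySem.Dict.empty] at hp)]
    have hb : bOff n (-n) = 0 := by
      unfold bOff
      rw [if_pos (by omega)]
      ring
    have hbr := bridge n hn (2*n+1).toNat (-n) (by omega) (by omega)
    rw [hb] at hbr
    have hbr2 : suffixF n (2*n+1).toNat (-n) 0 = assocPairsB n := by rw [hbr]; rfl
    show (PySem.Dict.empty.items ++ suffixF n (2*n+1).toNat (-n) 0).map _ = _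
    rw [hbr2]
    rfl
  · rw [PySem.List.pyRange_one_eq_nil (show (n:Int)+1 ≤ -n by omega)]
    simp only [List.foldl_nil]
    unfold assocPairsB
    rw [PySem.List.pyRange_one_eq_nil (show (n:Int)+1 ≤ -n by omega)]
    simp only [List.flatMap_nil, List.map_nil]
    rfl

-- ===== VERDICT (by name: the statement is the Claim_ definition above) =====
theorem association_spec : Claim_equal_association := by
  intro n _
  show association n = association_alt n
  exact main_eq n
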